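-- pv_equiv track=rewrite | github.com/jungianca6/Ejercicios_IntroYTaller | Códigos/practica examen 2.py | partiraux
-- ===== SOURCE A (Python) =====
-- def partiraux(num,exp,result,sumanum):
--     if num==0:
--         return [sumanum]+result
--     elif num%10!=0:
--         return partiraux(num//10,exp+1,result,sumanum+num%10*10**exp)
--     elif sumanum==0:
--         return partiraux(num//10,0,[]+result,0)
--     else:
--         return partiraux(num//10,0,[sumanum]+result,0)
-- ===== SOURCE B (Python) =====
-- def partiraux(num, exp, result, sumanum):
--     # Phase 1: extract the digits of num, least significant first.
--     digits = []
--     n = num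
--     while n != 0:
--         digits.append(n % 10)
--         n //= 10
--     # Phase 2: fold over the digit list, appending completed groups
--     # in the order they are finished, then reverse once at the end.
--     groups = []
--     cur, e = sumanum, exp
--     for d in digits:
--         if d != 0:
--             cur += d * 10 ** e
--             e += 1
--         else:
--             if cur != 0:
--                 groups.append(cur)
--             cur, e = 0, 0
--     groups.reverse()
--     return [cur] + groups + result
-- ===== Notes on version B (the rewrite author's own statement) =====
-- stated objective: alternative
-- what changed: Replaces A's tail recursion that prepends finished groups directly onto the result list by a two-phase version: first extract the digit list, then fold over it appending finished groups to a separate accumulator that is reversed once and concatenated at the end.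
-- outside the precondition, e.g. on partiraux(5, -1, [], 0): A returns [0.5], B returns [0.5]; on partiraux(-5, 0, [], 0): A raises RecursionError, B does not finish within the time limit
import Mathlib
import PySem

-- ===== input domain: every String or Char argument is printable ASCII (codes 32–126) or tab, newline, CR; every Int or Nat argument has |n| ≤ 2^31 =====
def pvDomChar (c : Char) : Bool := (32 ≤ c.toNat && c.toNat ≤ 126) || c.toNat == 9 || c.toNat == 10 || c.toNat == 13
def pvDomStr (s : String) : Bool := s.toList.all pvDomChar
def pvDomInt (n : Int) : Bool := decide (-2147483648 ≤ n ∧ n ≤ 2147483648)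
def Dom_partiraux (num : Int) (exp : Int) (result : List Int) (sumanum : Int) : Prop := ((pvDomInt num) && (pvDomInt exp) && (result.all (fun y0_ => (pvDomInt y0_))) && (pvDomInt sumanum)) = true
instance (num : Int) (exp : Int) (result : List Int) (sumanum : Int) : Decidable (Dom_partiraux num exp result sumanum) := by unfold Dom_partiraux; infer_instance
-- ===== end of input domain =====

-- ===== PORT A =====
-- B changes the decomposition: digit-list extraction + a fold with an appended, finally
-- reversed group accumulator, instead of A's tail recursion prepending onto result.
-- A's recursion diverges for num < 0 (num//10 never reaches 0); Pre_ excludes that, and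
-- the `num ≤ 0` guard only makes the Lean recursion total there.  10**exp is ported as
-- 10 ^ exp.toNat, exact whenever exp ≥ 0 at the point of use (guaranteed by Pre_).
def partiraux (num : Int) (exp : Int) (result : List Int) (sumanum : Int) : List Int :=
  if _h : num ≤ 0 then sumanum :: result          -- Python: num == 0 (num < 0 diverges, outside Pre_)
  else if PySem.Int.mod num 10 ≠ 0 then
    partiraux (PySem.Int.floordiv num 10) (exp + 1) result
      (sumanum + PySem.Int.mod num 10 * 10 ^ exp.toNat)
  else if sumanum = 0 then
    partiraux (PySem.Int.floordiv num 10) 0 ([] ++ result) 0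
  else
    partiraux (PySem.Int.floordiv num 10) 0 (sumanum :: result) 0
termination_by num.toNat
decreasing_by
  all_goals
    have h10 : PySem.Int.floordiv num 10 = num / 10 :=
      PySem.Int.floordiv_eq_ediv_of_pos (by omega)
    simp only [h10]; omega

-- ===== PORT B =====
-- digits of n, least significant first (B's first while loop; same totality guard)
def pvDigits (n : Int) : List Int :=
  if _h : n ≤ 0 then []
  else PySem.Int.mod n 10 :: pvDigits (PySem.Int.floordiv n 10)
termination_by n.toNat
decreasing_by
  have h10 : PySem.Int.floordiv n 10 = n / 10 :=
    PySem.Int.floordiv_eq_ediv_of_pos (by omega)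
  simp only [h10]; omega

-- one step of B's for-loop: state is (cur, e, groups)
def pvStep (st : Int × Int × List Int) (d : Int) : Int × Int × List Int :=
  if d ≠ 0 then (st.1 + d * 10 ^ st.2.1.toNat, st.2.1 + 1, st.2.2)
  else (0, 0, if st.1 ≠ 0 then st.2.2 ++ [st.1] else st.2.2)

def partiraux_alt (num : Int) (exp : Int) (result : List Int) (sumanum : Int) : List Int :=
  let st := (pvDigits num).foldl pvStep (sumanum, exp, [])
  st.1 :: st.2.2.reverse ++ result

-- ===== PRECONDITION & SPEC =====
-- Pre_ excludes num < 0, where A's recursion never terminates (RecursionError), and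
-- exp < 0 with a nonzero last digit, where 10**exp is a Python float so A returns a
-- list containing a float rather than a list of ints.
def Pre_partiraux (num : Int) (exp : Int) (result : List Int) (sumanum : Int) : Prop :=
  0 ≤ num ∧ (0 ≤ exp ∨ PySem.Int.mod num 10 = 0)
instance (num : Int) (exp : Int) (result : List Int) (sumanum : Int) : Decidable (Pre_partiraux num exp result sumanum) := by unfold Pre_partiraux; infer_instance
def pvWitness_partiraux : Int × Int × List Int × Int := (502, 0, [7], 0)

def Spec_partiraux (num : Int) (exp : Int) (result : List Int) (sumanum : Int) (out : List Int) : Prop := out = partiraux_alt num exp result sumanum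
instance (num : Int) (exp : Int) (result : List Int) (sumanum : Int) (out : List Int) : Decidable (Spec_partiraux num exp result sumanum out) := by unfold Spec_partiraux; infer_instance

-- ===== CLAIM (what is proved, stated in full; the proofs are below) =====
def Claim_equal_partiraux : Prop := ∀ (num : Int) (exp : Int) (result : List Int) (sumanum : Int), Dom_partiraux num exp result sumanum → Pre_partiraux num exp result sumanum → Spec_partiraux num exp result sumanum (partiraux num exp result sumanum)

-- ===== LEMMAS AND PROOFS =====

-- A's recursion, rephrased over an explicit digit list (proof-only bridge).
def pvGo : List Int → Int → List Int → Int → List Int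
  | [], _, res, c => c :: res
  | d :: ds, e, res, c =>
    if d ≠ 0 then pvGo ds (e + 1) res (c + d * 10 ^ e.toNat)
    else if c = 0 then pvGo ds 0 res 0
    else pvGo ds 0 (c :: res) 0

theorem partiraux_eq_go : ∀ (n : Nat) (num : Int), num.toNat = n → 0 ≤ num →
    ∀ (e : Int) (res : List Int) (c : Int),
      partiraux num e res c = pvGo (pvDigits num) e res c := by
  intro n
  induction n using Nat.strong_induction_on with
  | _ n ih =>
    intro num hn hnum e res c
    by_cases h0 : num ≤ 0
    · rw [partiraux, pvDigits]
      simp [h0, pvGo]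
    · have hq : PySem.Int.floordiv num 10 = num / 10 :=
        PySem.Int.floordiv_eq_ediv_of_pos (by omega)
      have hq0 : 0 ≤ num / 10 := by omega
      have hqlt : (num / 10).toNat < n := by omega
      rw [partiraux, pvDigits]
      simp only [dif_neg h0, hq, pvGo]
      split_ifs with h1 h2
      · exact ih _ hqlt _ rfl hq0 _ _ _
      · rw [List.nil_append]; exact ih _ hqlt _ rfl hq0 _ _ _
      · exact ih _ hqlt _ rfl hq0 _ _ _

theorem foldl_pvStep_acc (ds : List Int) :
    ∀ (c e : Int) (gs : List Int),
      ds.foldl pvStep (c, e, gs)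
        = ((ds.foldl pvStep (c, e, [])).1, (ds.foldl pvStep (c, e, [])).2.1,
           gs ++ (ds.foldl pvStep (c, e, [])).2.2) := by
  induction ds with
  | nil => intro c e gs; simp
  | cons d ds ih =>
    intro c e gs
    by_cases hd : d = 0
    · subst hd
      by_cases hc : c = 0
      · subst hc
        simpa [pvStep] using ih 0 0 gs
      · simp [pvStep, hc]
        rw [ih 0 0 (gs ++ [c]), ih 0 0 [c]]
        simp
    · simp only [List.foldl_cons, pvStep, if_pos hd]
      exact ih _ _ gs

theorem go_eq_fold (ds : List Int) :
    ∀ (c e : Int) (res : List Int),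
      pvGo ds e res c
        = (ds.foldl pvStep (c, e, [])).1
            :: (ds.foldl pvStep (c, e, [])).2.2.reverse ++ res := by
  induction ds with
  | nil => intro c e res; simp [pvGo]
  | cons d ds ih =>
    intro c e res
    by_cases hd : d = 0
    · subst hd
      by_cases hc : c = 0
      · subst hc
        simpa [pvGo, pvStep] using ih 0 0 res
      · simp [pvGo, pvStep, hc]
        rw [ih 0 0 (c :: res), foldl_pvStep_acc ds 0 0 [c]]
        simp
    · simp only [pvGo, if_pos hd, List.foldl_cons, pvStep]
      exact ih _ _ res

-- ===== VERDICT (by name: the statement is the Claim_ definition above) =====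
theorem partiraux_spec : Claim_equal_partiraux := by
  intro num exp result sumanum _hdom hpre
  unfold Spec_partiraux partiraux_alt
  rw [partiraux_eq_go num.toNat num rfl hpre.1, go_eq_fold]
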